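-- pv_equiv track=rewrite | github.com/hengliao1972/pyCircuit | janus/tools/animate_tmu_trace.py | path_nodes
-- ===== SOURCE A (Python) =====
-- RING_ORDER = [0, 1, 3, 5, 7, 6, 4, 2]
--
-- def path_nodes(src, dst):
--     if src == dst:
--         return [src]
--     n = len(RING_ORDER)
--     pos = {node: i for i, node in enumerate(RING_ORDER)}
--     s = pos[src]
--     d = pos[dst]
--     cw = (d - s) % n
--     cc = (s - d) % n
--     if cw <= cc:
--         step = 1
--         dist = cw
--     else:
--         step = -1
--         dist = cc
--     nodes = []
--     idx = s
--     for _ in range(dist + 1):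
--         nodes.append(RING_ORDER[idx])
--         idx = (idx + step) % n
--     return nodes
-- ===== SOURCE B (Python) =====
-- RING_ORDER = [0, 1, 3, 5, 7, 6, 4, 2]
--
-- def path_nodes(src, dst):
--     # construct both directed walks around the ring and return the shorter (clockwise on ties)
--     if src == dst:
--         return [src]
--     n = len(RING_ORDER)
--     pos = {node: i for i, node in enumerate(RING_ORDER)}
--     s = pos[src]
--     d = pos[dst]
--     cw = [RING_ORDER[s]]
--     i = s
--     while i != d:
--         i = (i + 1) % n
--         cw.append(RING_ORDER[i])
--     cc = [RING_ORDER[s]]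
--     i = s
--     while i != d:
--         i = (i - 1) % n
--         cc.append(RING_ORDER[i])
--     return cw if len(cw) <= len(cc) else cc
-- ===== Notes on version B (the rewrite author's own statement) =====
-- stated objective: alternative
-- what changed: Instead of computing both modular distances and then generating one path with a chosen step and length via range(dist+1), B walks the ring in both directions until it hits the destination, materialising both candidate paths, and returns the shorter one (clockwise on ties).
import Mathlib
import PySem

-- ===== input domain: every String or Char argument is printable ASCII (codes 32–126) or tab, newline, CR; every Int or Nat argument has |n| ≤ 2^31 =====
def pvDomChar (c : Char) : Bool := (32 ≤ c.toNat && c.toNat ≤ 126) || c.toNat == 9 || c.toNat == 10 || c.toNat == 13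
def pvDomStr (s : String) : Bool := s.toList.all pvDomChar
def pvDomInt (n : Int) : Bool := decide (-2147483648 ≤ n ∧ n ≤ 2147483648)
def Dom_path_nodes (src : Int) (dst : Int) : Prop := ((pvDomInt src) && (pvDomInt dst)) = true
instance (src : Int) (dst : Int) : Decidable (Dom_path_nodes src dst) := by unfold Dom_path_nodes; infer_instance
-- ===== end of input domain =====

-- B differs from A by building both directed walks around the ring and picking the shorter
-- (clockwise on ties), instead of computing modular distances and generating one path.

-- ===== PORT A =====
def RING_ORDER : List Int := [0, 1, 3, 5, 7, 6, 4, 2]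

def path_nodes (src : Int) (dst : Int) : List Int :=
  if src = dst then [src] else
  let n : Int := (RING_ORDER.length : Int)
  let pos : PySem.Dict Int Int :=
    PySem.Dict.ofList ((PySem.List.enumerate RING_ORDER 0).map (fun p => (p.2, p.1)))
  match pos.get? src, pos.get? dst with
  | some s, some d =>
    let cw := PySem.Int.mod (d - s) n
    let cc := PySem.Int.mod (s - d) n
    let sd : Int × Int := if cw ≤ cc then (1, cw) else (-1, cc)
    let r := (PySem.List.pyRange 0 (sd.2 + 1) 1).foldl
      (fun (acc : List Int × Int) _ =>
        (acc.1 ++ [PySem.List.pyGetD RING_ORDER acc.2 0],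
         PySem.Int.mod (acc.2 + sd.1) n)) ([], s)
    r.1
  | _, _ => []  -- KeyError in Python; excluded by Pre_path_nodes

-- ===== PORT B =====
-- the while loops of Source B: move idx by `step` mod 8, append RING_ORDER[idx], stop at d.
-- fuel = 8 suffices (the walk visits each of the 8 positions at most once).
def pvRING : List Int := [0, 1, 3, 5, 7, 6, 4, 2]

def pvWalk (d : Int) (step : Int) : Nat → Int → List Int
  | 0, _ => []
  | fuel + 1, i =>
    if i = d then []
    else
      let j := PySem.Int.mod (i + step) 8
      PySem.List.pyGetD pvRING j 0 :: pvWalk d step fuel j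

def path_nodes_alt (src : Int) (dst : Int) : List Int :=
  if src = dst then [src] else
  let pos : PySem.Dict Int Int :=
    PySem.Dict.ofList ((PySem.List.enumerate pvRING 0).map (fun p => (p.2, p.1)))
  match pos.get? src with
  | none => []  -- KeyError in Python; excluded by Pre_path_nodes
  | some s =>
    match pos.get? dst with
    | none => []  -- KeyError in Python; excluded by Pre_path_nodes
    | some d =>
      let cw := PySem.List.pyGetD pvRING s 0 :: pvWalk d 1 8 s
      let cc := PySem.List.pyGetD pvRING s 0 :: pvWalk d (-1) 8 s
      if cw.length ≤ cc.length then cw else cc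

-- ===== PRECONDITION & SPEC =====
-- Pre_ excludes exactly the inputs where Python A raises KeyError: src ≠ dst with
-- either node not one of the 8 ring nodes.
def Pre_path_nodes (src : Int) (dst : Int) : Prop :=
  src = dst ∨ (src ∈ ([0, 1, 3, 5, 7, 6, 4, 2] : List Int) ∧ dst ∈ ([0, 1, 3, 5, 7, 6, 4, 2] : List Int))
instance (src : Int) (dst : Int) : Decidable (Pre_path_nodes src dst) := by unfold Pre_path_nodes; infer_instance

def pvWitness_path_nodes : Int × Int := (0, 5)

def Spec_path_nodes (src : Int) (dst : Int) (out : List Int) : Prop := out = path_nodes_alt src dst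
instance (src : Int) (dst : Int) (out : List Int) : Decidable (Spec_path_nodes src dst out) := by unfold Spec_path_nodes; infer_instance

-- ===== CLAIM (what is proved, stated in full; the proofs are below) =====
def Claim_equal_path_nodes : Prop := ∀ (src : Int) (dst : Int), Dom_path_nodes src dst → Pre_path_nodes src dst → Spec_path_nodes src dst (path_nodes src dst)

-- ===== LEMMAS AND PROOFS =====

lemma path_nodes_self (src : Int) : path_nodes src src = [src] := by
  simp [path_nodes]

lemma path_nodes_alt_self (src : Int) : path_nodes_alt src src = [src] := by
  simp [path_nodes_alt]

-- ===== VERDICT (by name: the statement is the Claim_ definition above) =====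
theorem path_nodes_spec : Claim_equal_path_nodes := by
  intro src dst _ hpre
  unfold Spec_path_nodes
  rcases hpre with h | ⟨hs, hd⟩
  · subst h; rw [path_nodes_self, path_nodes_alt_self]
  · fin_cases hs <;> fin_cases hd <;> decide
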